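-- pv_equiv track=rewrite | github.com/osibjdf-12354/twitdelete | twitdelete.py | pick_cdp_target
-- ===== SOURCE A (Python) =====
-- from typing import Any, Callable
--
-- def pick_cdp_target(targets: list[dict[str, Any]]) -> dict[str, Any]:
--     with_ws = [t for t in targets if isinstance(t, dict) and isinstance(t.get("webSocketDebuggerUrl"), str)]
--     if not with_ws:
--         raise ValueError("No debuggable CDP targets found")
--
--     preferred = [
--         t for t in with_ws if "x.com" in str(t.get("url", "")).lower() or "twitter.com" in str(t.get("url", "")).lower()
--     ]
--     return preferred[0] if preferred else with_ws[0]
-- ===== SOURCE B (Python) =====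
-- def pick_cdp_target(targets: list[dict]) -> dict:
--     first_ws = None
--     for t in targets:
--         if not (isinstance(t, dict) and isinstance(t.get("webSocketDebuggerUrl"), str)):
--             continue
--         url = str(t.get("url", "")).lower()
--         if "x.com" in url or "twitter.com" in url:
--             return t
--         if first_ws is None:
--             first_ws = t
--     if first_ws is None:
--         raise ValueError("No debuggable CDP targets found")
--     return first_ws
-- ===== Notes on version B (the rewrite author's own statement) =====
-- stated objective: simpler
-- what changed: Replaces A's two full list comprehensions (all valid targets, then all preferred ones) by a single short-circuiting pass that returns the first preferred target immediately and keeps only the first valid target as a sentinel.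
import Mathlib
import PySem

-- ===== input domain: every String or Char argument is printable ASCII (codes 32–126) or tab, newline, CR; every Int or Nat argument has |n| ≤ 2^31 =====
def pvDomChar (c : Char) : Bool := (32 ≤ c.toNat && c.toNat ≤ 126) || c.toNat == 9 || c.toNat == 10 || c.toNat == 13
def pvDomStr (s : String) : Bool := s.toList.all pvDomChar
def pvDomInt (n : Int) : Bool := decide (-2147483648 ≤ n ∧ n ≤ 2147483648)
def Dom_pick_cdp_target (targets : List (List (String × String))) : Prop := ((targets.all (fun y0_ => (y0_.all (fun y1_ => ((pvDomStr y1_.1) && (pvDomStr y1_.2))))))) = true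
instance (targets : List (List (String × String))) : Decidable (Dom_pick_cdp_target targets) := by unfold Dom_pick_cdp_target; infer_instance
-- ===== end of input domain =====

-- One honest line: B replaces A's two list comprehensions with a single short-circuiting
-- pass keeping the first valid target as a sentinel (objective: simpler, single pass).

-- ===== PORT A =====
-- t.get("webSocketDebuggerUrl") is a str  (all values are str here, so: the key is present)
def pvHasWS (t : List (String × String)) : Bool :=
  ((PySem.Dict.mk t).get? "webSocketDebuggerUrl").isSome

-- "x.com" in str(t.get("url","")).lower() or "twitter.com" in str(t.get("url","")).lower()
def pvPref (t : List (String × String)) : Bool :=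
  PySem.Str.isIn "x.com" (PySem.Str.lower ((PySem.Dict.mk t).getD "url" "")) ||
  PySem.Str.isIn "twitter.com" (PySem.Str.lower ((PySem.Dict.mk t).getD "url" ""))

def pick_cdp_target (targets : List (List (String × String))) : List (String × String) :=
  let with_ws := targets.filter pvHasWS
  -- 'if not with_ws: raise ValueError(...)' — excluded by Pre_pick_cdp_target
  let preferred := with_ws.filter pvPref
  match preferred with
  | p :: _ => p
  | [] => with_ws.headD []

-- ===== PORT B =====
-- guard of B: t.get("webSocketDebuggerUrl") is a str (first-match association lookup)
def pvValidB (t : List (String × String)) : Bool :=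
  (t.lookup "webSocketDebuggerUrl").isSome

-- url = str(t.get("url","")).lower(); "x.com" in url or "twitter.com" in url
def pvPrefB (t : List (String × String)) : Bool :=
  let url := PySem.Str.lower ((t.lookup "url").getD "")
  PySem.Str.isIn "x.com" url || PySem.Str.isIn "twitter.com" url

-- the for-loop of Source B; the accumulator is first_ws (None until the first valid target)
def pvPickLoop : List (List (String × String)) → Option (List (String × String)) → List (String × String)
  | [], fw => fw.getD []   -- first_ws is None ⇒ ValueError (outside Pre_); else return first_ws
  | t :: rest, fw =>
    if pvValidB t then
      if pvPrefB t then t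
      else pvPickLoop rest (some (fw.getD t))   -- 'if first_ws is None: first_ws = t'
    else pvPickLoop rest fw

def pick_cdp_target_alt (targets : List (List (String × String))) : List (String × String) :=
  pvPickLoop targets none

-- ===== PRECONDITION & SPEC =====
-- A raises ValueError when no target has a "webSocketDebuggerUrl" entry; those inputs are excluded.
def Pre_pick_cdp_target (targets : List (List (String × String))) : Prop :=
  targets.any pvHasWS = true
instance (targets : List (List (String × String))) : Decidable (Pre_pick_cdp_target targets) := by
  unfold Pre_pick_cdp_target; infer_instance

def pvWitness_pick_cdp_target : (List (List (String × String))) :=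
  [[("webSocketDebuggerUrl", "ws://127.0.0.1/devtools/page/1"), ("url", "https://x.com/home")]]

def Spec_pick_cdp_target (targets : List (List (String × String))) (out : List (String × String)) : Prop := out = pick_cdp_target_alt targets
instance (targets : List (List (String × String))) (out : List (String × String)) : Decidable (Spec_pick_cdp_target targets out) := by unfold Spec_pick_cdp_target; infer_instance

-- ===== CLAIM (what is proved, stated in full; the proofs are below) =====
def Claim_equal_pick_cdp_target : Prop := ∀ (targets : List (List (String × String))), Dom_pick_cdp_target targets → Pre_pick_cdp_target targets → Spec_pick_cdp_target targets (pick_cdp_target targets)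

-- ===== LEMMAS AND PROOFS =====

theorem get?_mk_eq_lookup (t : List (String × String)) (k : String) :
    (PySem.Dict.mk t).get? k = t.lookup k := by
  induction t with
  | nil => simp [PySem.Dict.get?]
  | cons p rest ih =>
      rcases p with ⟨a, b⟩
      rw [PySem.Dict.get?_mk_cons]
      by_cases h : a = k
      · simp [h, List.lookup]
      · have hk : (k == a) = false := by
          simp only [beq_eq_false_iff_ne, ne_eq]
          exact fun e => h e.symm
        simp [List.lookup, h, hk, ih]

theorem validB_eq (t : List (String × String)) : pvValidB t = pvHasWS t := by
  simp [pvValidB, pvHasWS, get?_mk_eq_lookup]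

theorem prefB_eq (t : List (String × String)) : pvPrefB t = pvPref t := by
  simp [pvPrefB, pvPref, PySem.Dict.getD, get?_mk_eq_lookup]

theorem pickLoop_eq (ts : List (List (String × String))) (fw : Option (List (String × String))) :
    pvPickLoop ts fw =
      (match (ts.filter pvHasWS).filter pvPref with
       | p :: _ => p
       | [] => fw.getD ((ts.filter pvHasWS).headD [])) := by
  induction ts generalizing fw with
  | nil => simp [pvPickLoop]
  | cons t rest ih =>
      by_cases hv : pvHasWS t
      · by_cases hp : pvPref t
        · simp [pvPickLoop, validB_eq, prefB_eq, hv, hp, List.filter_cons]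
        · rw [show pvPickLoop (t :: rest) fw = pvPickLoop rest (some (fw.getD t)) by
            simp [pvPickLoop, validB_eq, prefB_eq, hv, hp], ih]
          simp only [List.filter_cons, hv, if_pos, prefB_eq, hp]
          cases h : (rest.filter pvHasWS).filter pvPref with
          | cons p _ => simp [h, hp]
          | nil => simp [h, hp]
      · rw [show pvPickLoop (t :: rest) fw = pvPickLoop rest fw by
          simp [pvPickLoop, validB_eq, hv], ih]
        simp [List.filter_cons, hv]

-- ===== VERDICT (by name: the statement is the Claim_ definition above) =====
theorem pick_cdp_target_spec : Claim_equal_pick_cdp_target := by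
  intro targets _ hpre
  unfold Spec_pick_cdp_target pick_cdp_target pick_cdp_target_alt
  rw [pickLoop_eq]
  cases h : (targets.filter pvHasWS).filter pvPref with
  | cons p _ => simp [h]
  | nil => simp [h]
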